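-- pv_equiv track=rewrite | github.com/daureg/magnet | veverica/grid_stretch.py | ancestor_info
-- ===== SOURCE A (Python) =====
-- from collections import deque
--
-- def ancestor_info(G, root):
--     q = deque()
--     discovered = {u: False for u in G}
--     q.append(root)
--     discovered[root] = True
--     parents = {root: None}
--     while q:
--         v = q.popleft()
--         for w in G[v]:
--             if not discovered[w]:
--                 q.append(w)
--                 discovered[w] = True
--                 parents[w] = v
--     return parents
-- ===== SOURCE B (Python) =====
-- def ancestor_info(G, root):
--     # Level-synchronous BFS: parents doubles as the discovered set;
--     # each round expands the whole current frontier into the next one.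
--     parents = {root: None}
--     frontier = [root]
--     while frontier:
--         nxt = []
--         for v in frontier:
--             for w in G[v]:
--                 if w not in parents:
--                     parents[w] = v
--                     nxt.append(w)
--         frontier = nxt
--     return parents
-- ===== Notes on version B (the rewrite author's own statement) =====
-- stated objective: alternative
-- what changed: Replaces the deque-driven vertex-at-a-time BFS with an auxiliary discovered dict by a level-synchronous BFS that expands the whole frontier into a fresh next-frontier list each round and uses the parents dict itself as the discovered set; the parents dict produced (values and insertion order) is identical.
-- outside the precondition, e.g. on ancestor_info({0: [], 1: [2]}, 0): A returns {0: None}, B returns {0: None}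
import Mathlib
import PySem

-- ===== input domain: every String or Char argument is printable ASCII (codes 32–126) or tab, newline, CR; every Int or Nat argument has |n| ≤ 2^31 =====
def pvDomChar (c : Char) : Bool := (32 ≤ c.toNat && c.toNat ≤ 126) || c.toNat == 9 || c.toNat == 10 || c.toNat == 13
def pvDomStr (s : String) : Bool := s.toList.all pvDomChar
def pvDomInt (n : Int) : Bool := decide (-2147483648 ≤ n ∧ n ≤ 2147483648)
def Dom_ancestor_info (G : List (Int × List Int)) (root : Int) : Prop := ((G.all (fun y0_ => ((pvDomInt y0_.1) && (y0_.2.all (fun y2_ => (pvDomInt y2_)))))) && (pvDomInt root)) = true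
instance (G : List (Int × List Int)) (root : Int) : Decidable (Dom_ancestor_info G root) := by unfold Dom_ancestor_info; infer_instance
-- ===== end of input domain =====

-- B is a level-synchronous BFS (whole-frontier expansion, parents doubles as the discovered
-- set) replacing A's single-vertex deque BFS with a separate discovered dict: same parents
-- dict, different loop decomposition (objective: simpler/alternative, not claimed faster).

-- ===== PORT A =====
-- One neighbor step of A's inner loop: 'if not discovered[w]: q.append(w); discovered[w]=True;
-- parents[w]=v'.  Python raises KeyError when w is not a key of discovered; the port reads a
-- missing key as True (no enqueue) — exact on Pre_, where every neighbor is a key.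
def pvStepA (v : Int) (st : List Int × PySem.Dict Int Bool × PySem.Dict Int (Option Int))
    (w : Int) : List Int × PySem.Dict Int Bool × PySem.Dict Int (Option Int) :=
  if st.2.1.getD w true = false then
    (st.1 ++ [w], st.2.1.insert w true, st.2.2.insert w (some v))
  else st

-- number of still-undiscovered entries (False values) — termination measure component of A
def pvUndiscA (d : PySem.Dict Int Bool) : Nat := d.values.count false

lemma pvCntEq (L : List (Int × Bool)) :
    (L.map Prod.snd).count false = L.countP (fun p => p.2 == false) := by
  induction L with
  | nil => rfl
  | cons p L ih => simp [List.count_cons, List.countP_cons, ih]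

lemma pvCountLe (w : Int) (L : List (Int × Bool)) :
    ((L.map (fun p => if p.1 == w then (w, true) else p)).countP (fun p => p.2 == false))
      ≤ (L.countP (fun p => p.2 == false)) := by
  induction L with
  | nil => simp
  | cons p L ih =>
    simp only [List.map_cons, List.countP_cons]
    by_cases h : (p.1 == w) = true
    · simp only [if_pos h, show (((w, true) : Int × Bool).2 == false) = false from rfl,
        Bool.false_eq_true, if_false]
      omega
    · simp only [if_neg h]; omega

lemma pvCountLt (w : Int) (L : List (Int × Bool)) {pr : Int × Bool}
    (h : L.find? (fun p => p.1 == w) = some pr) (hv : pr.2 = false) :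
    ((L.map (fun p => if p.1 == w then (w, true) else p)).countP (fun p => p.2 == false))
      < (L.countP (fun p => p.2 == false)) := by
  induction L with
  | nil => simp at h
  | cons p L ih =>
    simp only [List.map_cons, List.countP_cons]
    by_cases hp : (p.1 == w) = true
    · rw [List.find?_cons, hp] at h
      simp only at h
      injection h with h; subst h
      have hle := pvCountLe w L
      simp only [if_pos hp, show (((w, true) : Int × Bool).2 == false) = false from rfl,
        Bool.false_eq_true, if_false, hv, show ((false : Bool) == false) = true from rfl,
        if_true]
      omega
    · have hp' : (p.1 == w) = false := by simpa using hp
      rw [List.find?_cons, hp'] at h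
      simp only at h
      have := ih h
      simp only [if_neg hp]
      omega

lemma pvUndiscA_insert_lt (d : PySem.Dict Int Bool) (w : Int)
    (h : d.getD w true = false) : pvUndiscA (d.insert w true) < pvUndiscA d := by
  obtain ⟨pr, hfind, hv⟩ : ∃ pr, d.items.find? (fun p => p.1 == w) = some pr ∧ pr.2 = false := by
    simp only [PySem.Dict.getD, PySem.Dict.get?] at h
    cases hf : d.items.find? (fun p => p.1 == w) with
    | none => rw [hf] at h; simp at h
    | some pr => rw [hf] at h; simp at h; exact ⟨pr, rfl, h⟩
  have hcont : d.contains w = true := by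
    simp only [PySem.Dict.contains]
    have hmem := List.mem_of_find?_eq_some hfind
    have hpred := List.find?_some hfind
    exact List.any_eq_true.mpr ⟨pr, hmem, hpred⟩
  unfold pvUndiscA
  simp only [PySem.Dict.insert, hcont, if_true, PySem.Dict.values]
  rw [pvCntEq, pvCntEq]
  exact pvCountLt w d.items hfind hv

lemma pvFoldA_le (v : Int) (ns : List Int) :
    ∀ st : List Int × PySem.Dict Int Bool × PySem.Dict Int (Option Int),
      (ns.foldl (pvStepA v) st).1.length + pvUndiscA (ns.foldl (pvStepA v) st).2.1
        ≤ st.1.length + pvUndiscA st.2.1 := by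
  induction ns with
  | nil => intro st; simp
  | cons w ns ih =>
    intro st
    have h1 : (pvStepA v st w).1.length + pvUndiscA (pvStepA v st w).2.1
        ≤ st.1.length + pvUndiscA st.2.1 := by
      unfold pvStepA
      split
      · rename_i h
        have := pvUndiscA_insert_lt st.2.1 w h
        simp only [List.length_append, List.length_cons, List.length_nil]
        omega
      · exact le_rfl
    calc _ ≤ (pvStepA v st w).1.length + pvUndiscA (pvStepA v st w).2.1 := ih _
      _ ≤ _ := h1

-- A's while-loop: pop v from the left of q, scan its adjacency list G[v] (first-match lookup;
-- [] where Python would raise KeyError — unreachable under Pre_), recurse on the new state.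
def pvBfsA (G : List (Int × List Int)) :
    List Int → PySem.Dict Int Bool → PySem.Dict Int (Option Int) → PySem.Dict Int (Option Int)
  | [], _, par => par
  | v :: q, disc, par =>
    let st := ((PySem.Dict.mk G).getD v []).foldl (pvStepA v) (q, disc, par)
    pvBfsA G st.1 st.2.1 st.2.2
termination_by q disc _ => q.length + pvUndiscA disc
decreasing_by
  have h := pvFoldA_le v ((PySem.Dict.mk G).getD v []) (q, disc, par)
  simp only [List.length_cons]
  simp at h
  omega

def ancestor_info (G : List (Int × List Int)) (root : Int) : List (Int × Option Int) :=
  -- discovered = {u: False for u in G}; discovered[root] = True; parents = {root: None}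
  let discovered := (G.foldl (fun d p => d.insert p.1 false) PySem.Dict.empty).insert root true
  let parents : PySem.Dict Int (Option Int) := PySem.Dict.empty.insert root none
  (pvBfsA G [root] discovered parents).items

-- ===== PORT B =====
-- One neighbor step of B's inner loop: 'if w not in parents: parents[w]=v; nxt.append(w)'
def pvStepB (v : Int) (st : List Int × PySem.Dict Int (Option Int)) (w : Int) :
    List Int × PySem.Dict Int (Option Int) :=
  if st.2.contains w then st else (st.1 ++ [w], st.2.insert w (some v))

-- one whole round of B: expand every vertex of the frontier f, accumulating (nxt, parents)
def pvLevelFold (G : List (Int × List Int)) (f : List Int)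
    (st : List Int × PySem.Dict Int (Option Int)) : List Int × PySem.Dict Int (Option Int) :=
  f.foldl (fun st v => ((PySem.Dict.mk G).getD v []).foldl (pvStepB v) st) st

-- termination machinery for B: vertices occurring in some adjacency list, not yet in parents
def pvAllNodes (G : List (Int × List Int)) : List Int := PySem.Set.ofList (G.flatMap Prod.snd)

def pvUndiscB (G : List (Int × List Int)) (par : PySem.Dict Int (Option Int)) : Nat :=
  (pvAllNodes G).countP (fun x => !(par.contains x))

def pvMu (G : List (Int × List Int)) (f : List Int) (par : PySem.Dict Int (Option Int)) : Nat :=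
  2 * pvUndiscB G par + min f.length 1

lemma pvCountPflip {α : Type} {p q : α → Bool} :
    ∀ (S : List α) (w : α), w ∈ S → (∀ x ∈ S, q x = true → p x = true) →
      q w = false → p w = true → S.countP q < S.countP p := by
  intro S
  induction S with
  | nil => intro w hw; simp at hw
  | cons a S ih =>
    intro w hw hmono hq hp
    simp only [List.countP_cons]
    rcases List.mem_cons.mp hw with rfl | hw'
    · rw [hq, hp]
      have : S.countP q ≤ S.countP p := List.countP_mono_left (by
        intro x hx; exact hmono x (List.mem_cons_of_mem _ hx))
      simp only [Bool.false_eq_true, if_false, if_true]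
      omega
    · have := ih w hw' (fun x hx => hmono x (List.mem_cons_of_mem _ hx)) hq hp
      have ha : (if q a = true then 1 else 0) ≤ (if p a = true then 1 else 0) := by
        by_cases h : q a = true
        · rw [if_pos h, if_pos (hmono a (List.mem_cons_self) h)]
        · rw [if_neg h]; omega
      omega

lemma pvNbrsSub (G : List (Int × List Int)) (v : Int) :
    ∀ x ∈ (PySem.Dict.mk G).getD v [], x ∈ pvAllNodes G := by
  intro x hx
  simp only [PySem.Dict.getD, PySem.Dict.get?] at hx
  cases hf : List.find? (fun p => p.1 == v) (PySem.Dict.mk G).items with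
  | none => rw [hf] at hx; simp at hx
  | some pr =>
    rw [hf] at hx
    simp only [Option.map_some, Option.getD_some] at hx
    have hmem : pr ∈ G := List.mem_of_find?_eq_some hf
    unfold pvAllNodes
    rw [PySem.Set.mem_ofList]
    exact List.mem_flatMap.mpr ⟨pr, hmem, hx⟩

lemma pvStepB_le (G : List (Int × List Int)) (v : Int)
    (st : List Int × PySem.Dict Int (Option Int)) (w : Int) (hw : w ∈ pvAllNodes G) :
    pvUndiscB G (pvStepB v st w).2 + (pvStepB v st w).1.length
      ≤ pvUndiscB G st.2 + st.1.length := by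
  unfold pvStepB
  split
  · exact le_rfl
  · rename_i hc
    have hcf : st.2.contains w = false := by simpa using hc
    have hlt : pvUndiscB G ((st.2.insert w (some v))) < pvUndiscB G st.2 := by
      unfold pvUndiscB
      apply pvCountPflip (pvAllNodes G) w hw
      · intro x hx h
        simp only [Bool.not_eq_eq_eq_not, Bool.not_true] at h ⊢
        rw [PySem.Dict.contains_insert] at h
        exact (Bool.or_eq_false_iff.mp h).2
      · simp [PySem.Dict.contains_insert_self]
      · simp [hcf]
    simp only [List.length_append, List.length_cons, List.length_nil]
    omega

lemma pvInnerB_le (G : List (Int × List Int)) (v : Int) :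
    ∀ (ns : List Int) (st : List Int × PySem.Dict Int (Option Int)),
      (∀ w ∈ ns, w ∈ pvAllNodes G) →
      pvUndiscB G ((ns.foldl (pvStepB v) st)).2 + ((ns.foldl (pvStepB v) st)).1.length
        ≤ pvUndiscB G st.2 + st.1.length := by
  intro ns
  induction ns with
  | nil => intro st _; simp
  | cons w ns ih =>
    intro st hws
    simp only [List.foldl_cons]
    calc _ ≤ pvUndiscB G (pvStepB v st w).2 + (pvStepB v st w).1.length :=
            ih _ (fun x hx => hws x (List.mem_cons_of_mem _ hx))
      _ ≤ _ := pvStepB_le G v st w (hws w List.mem_cons_self)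

lemma pvLevelB_le (G : List (Int × List Int)) :
    ∀ (f : List Int) (st : List Int × PySem.Dict Int (Option Int)),
      pvUndiscB G (pvLevelFold G f st).2 + (pvLevelFold G f st).1.length
        ≤ pvUndiscB G st.2 + st.1.length := by
  intro f
  induction f with
  | nil => intro st; simp [pvLevelFold]
  | cons v f ih =>
    intro st
    unfold pvLevelFold at *
    simp only [List.foldl_cons]
    calc _ ≤ _ := ih _
      _ ≤ _ := pvInnerB_le G v _ st (pvNbrsSub G v)

lemma pvMuB_lt (G : List (Int × List Int)) (v : Int) (fs : List Int)
    (par : PySem.Dict Int (Option Int)) :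
    pvMu G (pvLevelFold G (v :: fs) ([], par)).1 (pvLevelFold G (v :: fs) ([], par)).2
      < pvMu G (v :: fs) par := by
  have h := pvLevelB_le G (v :: fs) ([], par)
  unfold pvMu
  simp only [List.length_nil, List.length_cons] at *
  rcases Nat.eq_zero_or_pos (pvLevelFold G (v :: fs) ([], par)).1.length with h0 | h0
  · rw [h0]; simp; omega
  · have : min (pvLevelFold G (v :: fs) ([], par)).1.length 1 ≤ 1 := Nat.min_le_right _ _
    have hmin : min (fs.length + 1) 1 = 1 := by omega
    rw [hmin]; omega

-- B's while-loop: replace the frontier by the whole next frontier each round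
def pvBfsB (G : List (Int × List Int)) :
    List Int → PySem.Dict Int (Option Int) → PySem.Dict Int (Option Int)
  | [], par => par
  | v :: fs, par =>
    let st := pvLevelFold G (v :: fs) ([], par)
    pvBfsB G st.1 st.2
termination_by f par => pvMu G f par
decreasing_by exact pvMuB_lt G v fs par

def ancestor_info_alt (G : List (Int × List Int)) (root : Int) : List (Int × Option Int) :=
  let parents : PySem.Dict Int (Option Int) := PySem.Dict.empty.insert root none
  (pvBfsB G [root] parents).items

-- ===== PRECONDITION & SPEC =====
-- Pre_ excludes: association lists with duplicate keys (cannot arise from a Python dict, whose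
-- first-vs-last key semantics the list cannot carry); a root that is not a key (A raises
-- KeyError at G[root]); and adjacency lists mentioning a non-key ("dangling") neighbor — A
-- raises KeyError at discovered[w] whenever BFS reaches one, and this closed-form condition
-- also excludes the graphs whose dangling neighbors are all unreachable, on which A returns
-- normally (see cite), because reachability is not a closed-form condition on the input.
def Pre_ancestor_info (G : List (Int × List Int)) (root : Int) : Prop :=
  (G.map Prod.fst).Nodup ∧ root ∈ G.map Prod.fst ∧
    ∀ p ∈ G, ∀ w ∈ p.2, w ∈ G.map Prod.fst
instance (G : List (Int × List Int)) (root : Int) : Decidable (Pre_ancestor_info G root) := by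
  unfold Pre_ancestor_info; infer_instance

def pvWitness_ancestor_info : (List (Int × List Int)) × Int :=
  ([(0, [1, 2]), (1, [0, 2]), (2, [])], 0)

def Spec_ancestor_info (G : List (Int × List Int)) (root : Int) (out : List (Int × Option Int)) : Prop := out = ancestor_info_alt G root
instance (G : List (Int × List Int)) (root : Int) (out : List (Int × Option Int)) : Decidable (Spec_ancestor_info G root out) := by unfold Spec_ancestor_info; infer_instance

-- ===== CLAIM (what is proved, stated in full; the proofs are below) =====
def Claim_equal_ancestor_info : Prop := ∀ (G : List (Int × List Int)) (root : Int), Dom_ancestor_info G root → Pre_ancestor_info G root → Spec_ancestor_info G root (ancestor_info G root)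

-- ===== LEMMAS AND PROOFS =====

-- The simulation invariant: discovered[w] is False exactly when w is a key not yet in parents
def pvInv1 (G : List (Int × List Int)) (d : PySem.Dict Int Bool)
    (par : PySem.Dict Int (Option Int)) : Prop :=
  ∀ w : Int, d.getD w true = false ↔ (w ∈ G.map Prod.fst ∧ par.contains w = false)

lemma pvNbrsKeys (G : List (Int × List Int))
    (hcl : ∀ p ∈ G, ∀ w ∈ p.2, w ∈ G.map Prod.fst) (v : Int) :
    ∀ w ∈ (PySem.Dict.mk G).getD v [], w ∈ G.map Prod.fst := by
  intro x hx
  simp only [PySem.Dict.getD, PySem.Dict.get?] at hx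
  cases hf : List.find? (fun p => p.1 == v) (PySem.Dict.mk G).items with
  | none => rw [hf] at hx; simp at hx
  | some pr =>
    rw [hf] at hx
    simp only [Option.map_some, Option.getD_some] at hx
    exact hcl pr (List.mem_of_find?_eq_some hf) x hx

lemma pvInvStep (G : List (Int × List Int)) (d : PySem.Dict Int Bool)
    (par : PySem.Dict Int (Option Int)) (w : Int) (v : Option Int)
    (hInv : pvInv1 G d par) :
    pvInv1 G (d.insert w true) (par.insert w v) := by
  intro u
  rw [PySem.Dict.getD_insert, PySem.Dict.contains_insert]
  by_cases hu : u = w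
  · rw [if_pos hu]
    simp [hu]
  · rw [if_neg hu]
    have : (u == w) = false := by simp [hu]
    rw [this]
    simpa using hInv u

lemma pvInnerSim (G : List (Int × List Int)) (v : Int) :
    ∀ (ns pend nxt : List Int) (d : PySem.Dict Int Bool) (par : PySem.Dict Int (Option Int)),
      pvInv1 G d par → (∀ w ∈ ns, w ∈ G.map Prod.fst) →
      ∃ δ d',
        ns.foldl (pvStepA v) (pend, d, par)
          = (pend ++ δ, d', (ns.foldl (pvStepB v) (nxt, par)).2)
        ∧ (ns.foldl (pvStepB v) (nxt, par)).1 = nxt ++ δ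
        ∧ pvInv1 G d' (ns.foldl (pvStepB v) (nxt, par)).2
        ∧ (∀ x ∈ δ, x ∈ G.map Prod.fst) := by
  intro ns
  induction ns with
  | nil =>
    intro pend nxt d par hInv _
    exact ⟨[], d, by simp, by simp, hInv, by simp⟩
  | cons w ns ih =>
    intro pend nxt d par hInv hns
    have hw : w ∈ G.map Prod.fst := hns w List.mem_cons_self
    simp only [List.foldl_cons]
    by_cases hc : par.contains w = true
    · have hA : pvStepA v (pend, d, par) w = (pend, d, par) := by
        unfold pvStepA
        rw [if_neg]
        intro h
        rw [(hInv w).mp h |>.2] at hc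
        cases hc
      have hB : pvStepB v (nxt, par) w = (nxt, par) := by
        unfold pvStepB
        rw [if_pos hc]
      rw [hA, hB]
      exact ih pend nxt d par hInv (fun x hx => hns x (List.mem_cons_of_mem _ hx))
    · have hc' : par.contains w = false := by simpa using hc
      have hgd : d.getD w true = false := (hInv w).mpr ⟨hw, hc'⟩
      have hA : pvStepA v (pend, d, par) w
          = (pend ++ [w], d.insert w true, par.insert w (some v)) := by
        unfold pvStepA
        rw [if_pos hgd]
      have hB : pvStepB v (nxt, par) w = (nxt ++ [w], par.insert w (some v)) := by
        unfold pvStepB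
        rw [if_neg (by simp [hc'])]
      rw [hA, hB]
      obtain ⟨δ, d', h1, h2, h3, h4⟩ :=
        ih (pend ++ [w]) (nxt ++ [w]) (d.insert w true) (par.insert w (some v))
          (pvInvStep G d par w (some v) hInv) (fun x hx => hns x (List.mem_cons_of_mem _ hx))
      refine ⟨w :: δ, d', ?_, ?_, h3, ?_⟩
      · rw [h1]; simp
      · rw [h2]; simp
      · intro x hx
        rcases List.mem_cons.mp hx with rfl | hx'
        · exact hw
        · exact h4 x hx'

lemma pvLevelSim (G : List (Int × List Int))
    (hcl : ∀ p ∈ G, ∀ w ∈ p.2, w ∈ G.map Prod.fst) :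
    ∀ (f nxt : List Int) (d : PySem.Dict Int Bool) (par : PySem.Dict Int (Option Int)),
      pvInv1 G d par → (∀ v ∈ f, v ∈ G.map Prod.fst) → (∀ x ∈ nxt, x ∈ G.map Prod.fst) →
      ∃ d',
        pvBfsA G (f ++ nxt) d par
          = pvBfsA G (pvLevelFold G f (nxt, par)).1 d' (pvLevelFold G f (nxt, par)).2
        ∧ pvInv1 G d' (pvLevelFold G f (nxt, par)).2
        ∧ (∀ x ∈ (pvLevelFold G f (nxt, par)).1, x ∈ G.map Prod.fst) := by
  intro f
  induction f with
  | nil =>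
    intro nxt d par hInv _ hnxt
    exact ⟨d, by simp [pvLevelFold], by simpa [pvLevelFold] using hInv, by
      simpa [pvLevelFold] using hnxt⟩
  | cons v f ih =>
    intro nxt d par hInv hf hnxt
    have hns := pvNbrsKeys G hcl v
    obtain ⟨δ, d1, h1, h2, h3, h4⟩ :=
      pvInnerSim G v ((PySem.Dict.mk G).getD v []) (f ++ nxt) nxt d par hInv hns
    have step : pvBfsA G ((v :: f) ++ nxt) d par
        = pvBfsA G (f ++ (nxt ++ δ)) d1
            (((PySem.Dict.mk G).getD v []).foldl (pvStepB v) (nxt, par)).2 := by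
      rw [List.cons_append, pvBfsA]
      rw [h1]
      simp [List.append_assoc]
    have hlf : pvLevelFold G (v :: f) (nxt, par)
        = pvLevelFold G f (nxt ++ δ, (((PySem.Dict.mk G).getD v []).foldl (pvStepB v) (nxt, par)).2) := by
      unfold pvLevelFold
      simp only [List.foldl_cons]
      congr 1
      rw [← h2]
    obtain ⟨d', hA, hI, hK⟩ := ih (nxt ++ δ) d1
        (((PySem.Dict.mk G).getD v []).foldl (pvStepB v) (nxt, par)).2 h3
        (fun x hx => hf x (List.mem_cons_of_mem _ hx))
        (by
          intro x hx
          rcases List.mem_append.mp hx with h | h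
          · exact hnxt x h
          · exact h4 x h)
    refine ⟨d', ?_, ?_, ?_⟩
    · rw [step, hA, hlf]
    · rw [hlf]; exact hI
    · rw [hlf]; exact hK

lemma pvMain (G : List (Int × List Int))
    (hcl : ∀ p ∈ G, ∀ w ∈ p.2, w ∈ G.map Prod.fst) :
    ∀ (n : Nat) (f : List Int) (d : PySem.Dict Int Bool) (par : PySem.Dict Int (Option Int)),
      pvMu G f par ≤ n → pvInv1 G d par → (∀ v ∈ f, v ∈ G.map Prod.fst) →
      pvBfsA G f d par = pvBfsB G f par := by
  intro n
  induction n with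
  | zero =>
    intro f d par hmu _ _
    cases f with
    | nil => rw [pvBfsA, pvBfsB]
    | cons v fs =>
      exfalso
      unfold pvMu at hmu
      simp only [List.length_cons] at hmu
      omega
  | succ n ih =>
    intro f d par hmu hInv hf
    cases f with
    | nil => rw [pvBfsA, pvBfsB]
    | cons v fs =>
      obtain ⟨d', hA, hI, hK⟩ := pvLevelSim G hcl (v :: fs) [] d par hInv hf (by simp)
      have hlt := pvMuB_lt G v fs par
      rw [List.append_nil] at hA
      rw [hA, pvBfsB]
      exact ih _ d' _ (by omega) hI hK

lemma pvDisc0Get (G : List (Int × List Int)) :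
    ∀ (d0 : PySem.Dict Int Bool) (w : Int),
      (G.foldl (fun d p => d.insert p.1 false) d0).get? w
        = if w ∈ G.map Prod.fst then some false else d0.get? w := by
  induction G with
  | nil => intro d0 w; simp
  | cons p G ih =>
    intro d0 w
    simp only [List.foldl_cons, List.map_cons]
    rw [ih]
    by_cases hk : w ∈ G.map Prod.fst
    · rw [if_pos hk, if_pos (List.mem_cons_of_mem _ hk)]
    · rw [if_neg hk, PySem.Dict.get?_insert]
      by_cases he : w = p.1
      · rw [if_pos he, if_pos (by simp [he])]
      · rw [if_neg he, if_neg (by simp [hk, he])]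

lemma pvInvInit (G : List (Int × List Int)) (root : Int) :
    pvInv1 G ((G.foldl (fun d p => d.insert p.1 false) PySem.Dict.empty).insert root true)
      (PySem.Dict.empty.insert root none) := by
  intro w
  rw [PySem.Dict.getD_insert]
  by_cases hr : w = root
  · rw [if_pos hr]
    simp only [PySem.Dict.contains_insert, PySem.Dict.contains_empty]
    constructor
    · intro h; cases h
    · rintro ⟨-, h⟩
      rw [hr] at h
      simp at h
  · rw [if_neg hr]
    rw [PySem.Dict.getD_eq_get?_getD, pvDisc0Get]
    simp only [PySem.Dict.contains_insert, PySem.Dict.contains_empty, PySem.Dict.get?_empty]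
    by_cases hk : w ∈ G.map Prod.fst
    · rw [if_pos hk]
      simp only [Option.getD_some]
      constructor
      · intro _
        refine ⟨hk, ?_⟩
        simp [hr]
      · intro _; trivial
    · rw [if_neg hk]
      simp only [Option.getD_none]
      constructor
      · intro h; cases h
      · rintro ⟨h, -⟩; exact absurd h hk

-- ===== VERDICT (by name: the statement is the Claim_ definition above) =====
theorem ancestor_info_spec : Claim_equal_ancestor_info := by
  intro G root _ hpre
  unfold Spec_ancestor_info ancestor_info ancestor_info_alt
  obtain ⟨-, hroot, hcl⟩ := hpre
  show (pvBfsA G [root] ((G.foldl (fun d p => d.insert p.1 false) PySem.Dict.empty).insert root true)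
      (PySem.Dict.empty.insert root none)).items
    = (pvBfsB G [root] (PySem.Dict.empty.insert root none)).items
  have := pvMain G hcl (pvMu G [root] (PySem.Dict.empty.insert root none)) [root]
    ((G.foldl (fun d p => d.insert p.1 false) PySem.Dict.empty).insert root true)
    (PySem.Dict.empty.insert root none) le_rfl (pvInvInit G root)
    (by intro v hv; simp at hv; subst hv; exact hroot)
  rw [this]
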